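-- pv_equiv track=rewrite | github.com/bigscience-workshop/data_tooling | cc_pseudo_crawl/python_scripts/process_for_concatenation.py | collapse_meta_
-- ===== SOURCE A (Python) =====
-- def collapse_meta_(batch):
--     """{"text": str, "meta": str}"""
--     # TODO: check that
--     columns_not_in_meta = ["text", "html_str"]
--     columns_to_collapse = [name for name in batch.keys() if name not in columns_not_in_meta]
--
--     new_batch = {
--         "text": batch["text"],
--         "meta": [
--             str({key: value for key, value in zip(columns_to_collapse, row)})
--             for row in zip(*[batch[name] for name in columns_to_collapse])
--         ]
--     }
--     return new_batch
-- ===== SOURCE B (Python) =====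
-- def collapse_meta_(batch):
--     """{"text": str, "meta": str}"""
--     columns_not_in_meta = ["text", "html_str"]
--     names = [name for name in batch.keys() if name not in columns_not_in_meta]
--     if names:
--         n = min(len(batch[name]) for name in names)
--         metas = [{} for _ in range(n)]
--         for name in names:
--             col = batch[name]
--             for i, m in enumerate(metas):
--                 m[name] = col[i]
--         meta = [str(m) for m in metas]
--     else:
--         meta = []
--     return {"text": batch["text"], "meta": meta}
-- ===== Notes on version B (the rewrite author's own statement) =====
-- stated objective: alternative
-- what changed: B fills one dict per row column-by-column (initialising min-length-many empty dicts and inserting each column's values), instead of A's row-wise zip(*columns) transpose with a per-row dict comprehension.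
import Mathlib
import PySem

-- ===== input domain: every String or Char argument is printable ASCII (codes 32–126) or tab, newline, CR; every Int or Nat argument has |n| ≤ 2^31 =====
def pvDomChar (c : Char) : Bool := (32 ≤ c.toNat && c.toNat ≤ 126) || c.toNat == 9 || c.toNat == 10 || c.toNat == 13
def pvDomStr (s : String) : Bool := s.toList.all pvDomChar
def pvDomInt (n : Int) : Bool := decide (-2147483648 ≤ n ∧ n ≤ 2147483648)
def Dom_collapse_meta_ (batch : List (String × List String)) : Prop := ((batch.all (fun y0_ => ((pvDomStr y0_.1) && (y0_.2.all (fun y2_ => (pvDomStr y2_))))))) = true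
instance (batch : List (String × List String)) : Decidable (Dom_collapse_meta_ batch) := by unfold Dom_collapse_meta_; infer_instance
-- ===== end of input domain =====

-- B collapses the columns by filling one dict per row COLUMN-BY-COLUMN instead of A's
-- row-wise zip(*) transpose; same cost, different decomposition ('alternative').

-- shared argument decoding: the association list denotes a Python dict (last value wins, first position kept)
def pvDictOf (batch : List (String × List String)) : PySem.Dict String (List String) :=
  batch.foldl (fun d p => d.insert p.1 p.2) PySem.Dict.empty

-- Python repr(s), exact on printable ASCII + tab/newline/CR (quote choice and escapes as CPython)
def pyReprChars (q : Char) (cs : List Char) : List Char :=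
  cs.flatMap (fun c =>
    if c = '\\' then ['\\', '\\']
    else if c = q then ['\\', q]
    else if c = '\t' then ['\\', 't']
    else if c = '\n' then ['\\', 'n']
    else if c = '\r' then ['\\', 'r']
    else [c])

def pyRepr (s : String) : String :=
  let cs := s.toList
  let q := if '\'' ∈ cs ∧ '\"' ∉ cs then '\"' else '\''
  String.ofList (q :: (pyReprChars q cs ++ [q]))

-- Python str(dict) over the dict's items, exact on the above domain
def pyDictStr (l : List (String × String)) : String :=
  "{" ++ PySem.Str.join ", " (l.map (fun p => pyRepr p.1 ++ ": " ++ pyRepr p.2)) ++ "}"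

-- ===== PORT A =====
-- models Python's n-ary zip(*ls): rows truncated to the shortest list; zip() of no iterables has no rows
def pvNzip (ls : List (List String)) : List (List String) :=
  let n := ((ls.map List.length).min?).getD 0
  (List.range n).map (fun i => ls.map (fun l => l.getD i ""))

def collapse_meta_ (batch : List (String × List String)) : List (String × List String) :=
  let d := pvDictOf batch
  let cols := d.keys.filter (fun name => !(name == "text" || name == "html_str"))
  let rows := pvNzip (cols.map (fun name => d.getD name []))
  [("text", d.getD "text" []),
   ("meta", rows.map (fun row => pyDictStr (cols.zip row)))]

-- ===== PORT B =====
def collapse_meta__alt (batch : List (String × List String)) : List (String × List String) :=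
  let d := pvDictOf batch
  let names := d.keys.filter (fun name => !(name == "text" || name == "html_str"))
  let metaList :=
    if names.isEmpty then ([] : List String)
    else
      let n := ((names.map (fun name => (d.getD name []).length)).min?).getD 0
      let metas := names.foldl
        (fun ms name =>
          let col := d.getD name []
          ms.mapIdx (fun i m => m.insert name (col.getD i "")))
        ((List.range n).map (fun _ => (PySem.Dict.empty : PySem.Dict String String)))
      metas.map (fun m => pyDictStr m.items)
  [("text", d.getD "text" []), ("meta", metaList)]

-- ===== PRECONDITION & SPEC =====
-- Pre_ excludes exactly the inputs without a "text" key, on which Python A raises KeyError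
def Pre_collapse_meta_ (batch : List (String × List String)) : Prop :=
  "text" ∈ batch.map Prod.fst
instance (batch : List (String × List String)) : Decidable (Pre_collapse_meta_ batch) := by
  unfold Pre_collapse_meta_; infer_instance

def pvWitness_collapse_meta_ : (List (String × List String)) :=
  [("text", ["a", "b"]), ("url", ["u", "v"])]

def Spec_collapse_meta_ (batch : List (String × List String)) (out : List (String × List String)) : Prop := out = collapse_meta__alt batch
instance (batch : List (String × List String)) (out : List (String × List String)) : Decidable (Spec_collapse_meta_ batch out) := by unfold Spec_collapse_meta_; infer_instance

-- ===== CLAIM (what is proved, stated in full; the proofs are below) =====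
def Claim_equal_collapse_meta_ : Prop := ∀ (batch : List (String × List String)), Dom_collapse_meta_ batch → Pre_collapse_meta_ batch → Spec_collapse_meta_ batch (collapse_meta_ batch)

-- ===== LEMMAS AND PROOFS =====

-- column-by-column filling commutes with the per-row view
theorem pvFoldl_mapIdx_swap (cs : List String) (f : String → Nat → String)
    (ms : List (PySem.Dict String String)) :
    cs.foldl (fun ms name => ms.mapIdx (fun i m => m.insert name (f name i))) ms
      = ms.mapIdx (fun i m => cs.foldl (fun m name => m.insert name (f name i)) m) := by
  induction cs generalizing ms with
  | nil => apply List.ext_getElem <;> simp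
  | cons c cs ih =>
    simp only [List.foldl_cons, ih]
    apply List.ext_getElem <;> simp

theorem pvMapIdx_map_range {α β : Type} (n : Nat) (e : α) (h : Nat → α → β) :
    ((List.range n).map (fun _ => e)).mapIdx h = (List.range n).map (fun i => h i e) := by
  apply List.ext_getElem <;> simp

theorem pvZip_map_self {α β : Type} (l : List α) (h : α → β) :
    l.zip (l.map h) = l.map (fun x => (x, h x)) := by
  induction l with
  | nil => rfl
  | cons a l ih => simp [ih]

theorem pvKeys_nodup (batch : List (String × List String)) : (pvDictOf batch).keys.Nodup := by
  unfold pvDictOf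
  exact PySem.Dict.nodup_keys_foldl_insert_key batch Prod.fst (fun _ p => p.2) PySem.Dict.empty (by simp)

-- ===== VERDICT (by name: the statement is the Claim_ definition above) =====
theorem collapse_meta__spec : Claim_equal_collapse_meta_ := by
  intro batch _ _
  unfold Spec_collapse_meta_ collapse_meta_ collapse_meta__alt pvNzip
  simp only []
  set d := pvDictOf batch with hd
  set cs := d.keys.filter (fun name => !(name == "text" || name == "html_str")) with hcs
  have hnodup : cs.Nodup := (pvKeys_nodup batch).filter _
  by_cases hempty : cs = []
  · simp [hempty]
  · have hne : cs.isEmpty = false := by simpa [List.isEmpty_iff] using hempty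
    simp only [hne, Bool.false_eq_true, if_false]
    congr 2
    rw [pvFoldl_mapIdx_swap cs (fun name i => (d.getD name []).getD i ""),
        pvMapIdx_map_range, List.map_map, List.map_map, List.map_map]
    simp only [Function.comp_def]
    congr 1
    apply List.map_congr_left
    intro i _
    congr 1
    rw [List.map_map, pvZip_map_self]
    have hfresh : ∀ a ∈ cs, (PySem.Dict.empty : PySem.Dict String String).contains a = false := by
      intro a _; simp [PySem.Dict.contains, PySem.Dict.empty]
    have := PySem.Dict.items_foldl_insert_fresh (l := cs) (k := id)
      (v := fun name => (d.getD name []).getD i "") (d := PySem.Dict.empty)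
      (by simpa using hfresh) (by simpa using hnodup)
    simpa using this.symm
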